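-- pv_equiv track=rewrite | github.com/reidab/csvdedupe | csvdedupe/csvhelpers.py | transformLatLongFieldDefinition
-- ===== SOURCE A (Python) =====
-- from copy import deepcopy
--
-- def transformLatLongFieldDefinition(field_definition):
--     """
--     Converts the custom LongLat, Latitude, and Longitude field types
--     used in the csvdedupe config to the single LatLong field type that
--     dedupe itself expects.
--
--     Works in concert with csvhelpers.parseLatLongFields()
--     """
--
--     converted_defs = deepcopy(field_definition)
--     lat_long_indicies = []
--
--     for i, field in enumerate(converted_defs):
--         if field['type'] == 'LongLat':
--             field['type'] = 'LatLong'
--         elif field['type'] == 'Latitude' or field['type'] == 'Longitude':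
--             lat_long_indicies.append(i)
--
--     if len(lat_long_indicies) == 2:
--         for i in sorted(lat_long_indicies, reverse=True):
--             del converted_defs[i]
--
--         converted_defs.append({
--             'field': '__LatLong',
--             'type': 'LatLong'})
--
--     return converted_defs
-- ===== SOURCE B (Python) =====
-- from copy import deepcopy
--
-- def transformLatLongFieldDefinition(field_definition):
--     count = len([f for f in field_definition
--                  if f['type'] == 'Latitude' or f['type'] == 'Longitude'])
--     result = []
--     for field in deepcopy(field_definition):
--         if field['type'] == 'LongLat':
--             field['type'] = 'LatLong'
--             result.append(field)
--         elif count == 2 and (field['type'] == 'Latitude' or field['type'] == 'Longitude'):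
--             continue
--         else:
--             result.append(field)
--     if count == 2:
--         result.append({'field': '__LatLong', 'type': 'LatLong'})
--     return result
-- ===== Notes on version B (the rewrite author's own statement) =====
-- stated objective: simpler
-- what changed: A collects indices of Latitude/Longitude fields while relabelling, then deletes them by index in reverse sorted order; B counts them in a pre-pass and builds the result in one filtered pass, skipping them when the count is 2 and appending the __LatLong field.
import Mathlib
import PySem

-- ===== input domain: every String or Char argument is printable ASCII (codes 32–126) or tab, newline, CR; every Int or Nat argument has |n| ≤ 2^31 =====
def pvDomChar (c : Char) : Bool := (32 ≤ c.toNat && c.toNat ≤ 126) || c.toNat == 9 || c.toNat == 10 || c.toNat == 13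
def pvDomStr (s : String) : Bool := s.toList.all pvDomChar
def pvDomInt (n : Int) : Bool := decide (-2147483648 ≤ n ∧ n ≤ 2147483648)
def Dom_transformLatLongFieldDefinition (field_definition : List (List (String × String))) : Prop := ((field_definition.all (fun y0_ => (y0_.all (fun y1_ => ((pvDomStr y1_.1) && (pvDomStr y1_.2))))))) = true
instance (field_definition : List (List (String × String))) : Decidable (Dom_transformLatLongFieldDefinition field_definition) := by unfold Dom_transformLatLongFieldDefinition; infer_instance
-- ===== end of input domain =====

-- B replaces A's collect-indices-then-reverse-delete with a count pre-pass and one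
-- filtered rebuild pass (objective: simpler). Neither implementation mutates its argument.

-- ===== PORT A =====
-- field['type'] (both Pythons read it the same way; KeyError excluded by Pre_ below, so getD's default is never read inside Pre_)
def pvTypeOf (f : List (String × String)) : String :=
  PySem.Dict.getD (PySem.Dict.mk f) "type" ""

-- field['type'] = 'LatLong' (overwrite keeps the key's position)
def pvSetLatLong (f : List (String × String)) : List (String × String) :=
  (PySem.Dict.insert (PySem.Dict.mk f) "type" "LatLong").items

-- the body of A's enumerate loop: state = (converted_defs so far, lat_long_indicies)
def pvAStep (acc : List (List (String × String)) × List Int) (p : Int × List (String × String)) :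
    List (List (String × String)) × List Int :=
  if pvTypeOf p.2 == "LongLat" then (acc.1 ++ [pvSetLatLong p.2], acc.2)
  else if pvTypeOf p.2 == "Latitude" || pvTypeOf p.2 == "Longitude" then
    (acc.1 ++ [p.2], acc.2 ++ [p.1])
  else (acc.1 ++ [p.2], acc.2)

def transformLatLongFieldDefinition (field_definition : List (List (String × String))) :
    List (List (String × String)) :=
  let st := (PySem.List.enumerate field_definition 0).foldl pvAStep ([], [])
  if st.2.length == 2 then
    -- del converted_defs[i] for i in sorted(indices, reverse=True); indices from enumerate are ≥ 0, so .toNat is exact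
    let deleted := (PySem.List.sorted st.2 (fun x => x) true).foldl
      (fun l (i : Int) => l.eraseIdx i.toNat) st.1
    deleted ++ [[("field", "__LatLong"), ("type", "LatLong")]]
  else st.1

-- ===== PORT B =====
def pvIsLatOrLong (f : List (String × String)) : Bool :=
  pvTypeOf f == "Latitude" || pvTypeOf f == "Longitude"

-- the body of B's single rebuild pass, parametrised by whether count == 2
def pvBStep (two : Bool) (acc : List (List (String × String))) (f : List (String × String)) :
    List (List (String × String)) :=
  if pvTypeOf f == "LongLat" then acc ++ [pvSetLatLong f]
  else if two && pvIsLatOrLong f then acc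
  else acc ++ [f]

def transformLatLongFieldDefinition_alt (field_definition : List (List (String × String))) :
    List (List (String × String)) :=
  let count := (field_definition.filter pvIsLatOrLong).length
  let res := field_definition.foldl (pvBStep (count == 2)) []
  if count == 2 then res ++ [[("field", "__LatLong"), ("type", "LatLong")]] else res

-- ===== PRECONDITION & SPEC =====
-- Pre_ excludes exactly the inputs where some field dict has no 'type' key: there both Pythons raise KeyError.
def Pre_transformLatLongFieldDefinition (field_definition : List (List (String × String))) : Prop :=
  ∀ f ∈ field_definition, PySem.Dict.contains (PySem.Dict.mk f) "type" = true
instance (field_definition : List (List (String × String))) : Decidable (Pre_transformLatLongFieldDefinition field_definition) := by unfold Pre_transformLatLongFieldDefinition; infer_instance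

def pvWitness_transformLatLongFieldDefinition : (List (List (String × String))) :=
  [[("field", "a"), ("type", "Latitude")], [("field", "b"), ("type", "Longitude")], [("field", "c"), ("type", "LongLat")]]

def Spec_transformLatLongFieldDefinition (field_definition : List (List (String × String))) (out : List (List (String × String))) : Prop := out = transformLatLongFieldDefinition_alt field_definition
instance (field_definition : List (List (String × String))) (out : List (List (String × String))) : Decidable (Spec_transformLatLongFieldDefinition field_definition out) := by unfold Spec_transformLatLongFieldDefinition; infer_instance

-- ===== CLAIM (what is proved, stated in full; the proofs are below) =====
def Claim_equal_transformLatLongFieldDefinition : Prop := ∀ (field_definition : List (List (String × String))), Dom_transformLatLongFieldDefinition field_definition → Pre_transformLatLongFieldDefinition field_definition → Spec_transformLatLongFieldDefinition field_definition (transformLatLongFieldDefinition field_definition)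

-- ===== LEMMAS AND PROOFS =====

-- relabelling of one field, as A's loop and B's loop both perform it
def pvRel (f : List (String × String)) : List (String × String) :=
  if pvTypeOf f == "LongLat" then pvSetLatLong f else f

-- the (Nat) positions of Latitude/Longitude fields, as A's loop records them
def pvPos : List (List (String × String)) → List Nat
  | [] => []
  | f :: fs => if pvIsLatOrLong f then 0 :: (pvPos fs).map (· + 1) else (pvPos fs).map (· + 1)

lemma pvPos_length (fd : List (List (String × String))) :
    (pvPos fd).length = (fd.filter pvIsLatOrLong).length := by
  induction fd with
  | nil => rfl
  | cons f fs ih =>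
    simp only [pvPos, List.filter_cons]
    by_cases h : pvIsLatOrLong f = true <;> simp [h, ih]

lemma pvPos_pairwise (fd : List (List (String × String))) :
    (pvPos fd).Pairwise (· < ·) := by
  induction fd with
  | nil => exact List.Pairwise.nil
  | cons f fs ih =>
    have hm : ((pvPos fs).map (· + 1)).Pairwise (· < ·) :=
      (List.pairwise_map).2 (ih.imp (by omega))
    simp only [pvPos]
    by_cases h : pvIsLatOrLong f = true
    · simp only [h, if_true, List.pairwise_cons]
      exact ⟨by intro b hb; simp [List.mem_map] at hb; omega, hm⟩
    · simp only [h, Bool.false_eq_true, if_false]; exact hm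

lemma map_shift (l : List Nat) (n : Int) :
    (l.map (· + 1)).map (fun k : Nat => n + (k : Int)) = l.map (fun k : Nat => (n + 1) + (k : Int)) := by
  rw [List.map_map]
  apply List.map_congr_left
  intro k _
  simp only [Function.comp]
  push_cast
  ring

-- the Int positions as A's loop records them, starting the enumeration at n
def pvPosI : List (List (String × String)) → Int → List Int
  | [], _ => []
  | f :: fs, n => if pvIsLatOrLong f then n :: pvPosI fs (n + 1) else pvPosI fs (n + 1)

lemma pvPosI_eq (fd : List (List (String × String))) (n : Int) :
    pvPosI fd n = (pvPos fd).map (fun k : Nat => n + (k : Int)) := by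
  induction fd generalizing n with
  | nil => rfl
  | cons f fs ih =>
    simp only [pvPosI, pvPos]
    by_cases h : pvIsLatOrLong f = true
    · simp only [h, if_true, List.map_cons, map_shift, ih]
      norm_num
    · simp only [h, Bool.false_eq_true, if_false, map_shift, ih]

-- A's enumerate loop computes (prefix ++ relabelled fields, prefix ++ recorded positions)
lemma aLoop_eq (fd : List (List (String × String))) (n : Int) (d0 : List (List (String × String))) (i0 : List Int) :
    (PySem.List.enumerate fd n).foldl pvAStep (d0, i0) =
      (d0 ++ fd.map pvRel, i0 ++ pvPosI fd n) := by
  induction fd generalizing n d0 i0 with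
  | nil => simp [PySem.List.enumerate_nil, pvPosI]
  | cons f fs ih =>
    rw [PySem.List.enumerate_cons, List.foldl_cons]
    by_cases hL : (pvTypeOf f == "LongLat") = true
    · have hp : pvIsLatOrLong f = false := by
        simp only [pvIsLatOrLong, beq_iff_eq] at hL ⊢; simp [hL]
      simp only [pvAStep, hL, if_true, ih, pvPosI, hp, Bool.false_eq_true, if_false,
        pvRel, List.map_cons]
      simp
    · by_cases hp : pvIsLatOrLong f = true
      · simp only [pvAStep, hL, Bool.false_eq_true, if_false, pvIsLatOrLong] at hp ⊢
        simp only [hp, if_true, ih, pvPosI, pvIsLatOrLong, hp, if_true,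
          pvRel, hL, Bool.false_eq_true, if_false, List.map_cons]
        simp
      · simp only [pvAStep, hL, Bool.false_eq_true, if_false, pvIsLatOrLong] at hp ⊢
        simp only [hp, if_false, ih, pvPosI, pvIsLatOrLong, hp, Bool.false_eq_true, if_false,
          pvRel, hL, List.map_cons]
        simp

-- B's pass appends relabelled fields, skipping Latitude/Longitude when two = true
lemma bLoop_eq (two : Bool) (fd : List (List (String × String))) (acc : List (List (String × String))) :
    fd.foldl (pvBStep two) acc =
      acc ++ (if two then ((fd.filter (fun f => !pvIsLatOrLong f)).map pvRel) else fd.map pvRel) := by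
  induction fd generalizing acc with
  | nil => simp
  | cons f fs ih =>
    rw [List.foldl_cons, ih]
    by_cases hL : (pvTypeOf f == "LongLat") = true
    · have hp : pvIsLatOrLong f = false := by
        simp only [pvIsLatOrLong, beq_iff_eq] at hL ⊢; simp [hL]
      cases two <;> simp [pvBStep, hL, hp, List.filter_cons, pvRel]
    · by_cases hp : pvIsLatOrLong f = true
      · cases two <;> simp [pvBStep, hL, hp, List.filter_cons, pvRel]
      · have hp' : pvIsLatOrLong f = false := by simpa using hp
        cases two <;> simp [pvBStep, hL, hp', List.filter_cons, pvRel]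

-- no Latitude/Longitude field: the filter keeps everything
lemma erase0 (fd : List (List (String × String))) (h : pvPos fd = []) :
    (fd.filter (fun f => !pvIsLatOrLong f)).map pvRel = fd.map pvRel := by
  induction fd with
  | nil => rfl
  | cons f fs ih =>
    simp only [pvPos] at h
    by_cases hp : pvIsLatOrLong f = true
    · simp [hp] at h
    · simp only [hp, Bool.false_eq_true, if_false, List.map_eq_nil_iff] at h
      simp [List.filter_cons, hp, ih h]

-- exactly one: deleting that index is the filter
lemma erase1 (fd : List (List (String × String))) (b : Nat) (h : pvPos fd = [b]) :
    (fd.map pvRel).eraseIdx b = (fd.filter (fun f => !pvIsLatOrLong f)).map pvRel := by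
  induction fd generalizing b with
  | nil => simp [pvPos] at h
  | cons f fs ih =>
    simp only [pvPos] at h
    by_cases hp : pvIsLatOrLong f = true
    · simp only [hp, if_true, List.cons.injEq] at h
      obtain ⟨hb, htl⟩ := h
      subst hb
      rw [List.map_eq_nil_iff] at htl
      simp [List.filter_cons, hp, List.eraseIdx, erase0 fs htl]
    · simp only [hp, Bool.false_eq_true, if_false] at h
      obtain ⟨b', hb', rfl⟩ : ∃ b', pvPos fs = [b'] ∧ b = b' + 1 := by
        cases hps : pvPos fs with
        | nil => simp [hps] at h
        | cons x t =>
          simp [hps] at h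
          exact ⟨x, by simp [hps, h.1.symm, h.2.symm], h.1.symm⟩
      simp [List.filter_cons, hp, List.eraseIdx, ih b' hb']

-- exactly two: deleting the larger then the smaller index is the filter
lemma erase2 (fd : List (List (String × String))) (a b : Nat) (h : pvPos fd = [a, b]) :
    ((fd.map pvRel).eraseIdx b).eraseIdx a =
      (fd.filter (fun f => !pvIsLatOrLong f)).map pvRel := by
  induction fd generalizing a b with
  | nil => simp [pvPos] at h
  | cons f fs ih =>
    simp only [pvPos] at h
    by_cases hp : pvIsLatOrLong f = true
    · simp only [hp, if_true, List.cons.injEq] at h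
      obtain ⟨ha, htl⟩ := h
      subst ha
      obtain ⟨b', hb', rfl⟩ : ∃ b', pvPos fs = [b'] ∧ b = b' + 1 := by
        cases hps : pvPos fs with
        | nil => simp [hps] at htl
        | cons x t =>
          simp [hps] at htl
          exact ⟨x, by simp [hps, htl.1.symm, htl.2.symm], htl.1.symm⟩
      simp [List.filter_cons, hp, List.eraseIdx, erase1 fs b' hb']
    · simp only [hp, Bool.false_eq_true, if_false] at h
      obtain ⟨a', b', hab, rfl, rfl⟩ :
          ∃ a' b', pvPos fs = [a', b'] ∧ a = a' + 1 ∧ b = b' + 1 := by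
        cases hps : pvPos fs with
        | nil => simp [hps] at h
        | cons x t =>
          cases t with
          | nil => simp [hps] at h
          | cons y u =>
            simp [hps] at h
            exact ⟨x, y, by simp [hps, h.2.2.symm, h.1.symm, h.2.1.symm], h.1.symm, h.2.1.symm⟩
      simp [List.filter_cons, hp, List.eraseIdx, ih a' b' hab]

-- ===== VERDICT (by name: the statement is the Claim_ definition above) =====
theorem transformLatLongFieldDefinition_spec : Claim_equal_transformLatLongFieldDefinition := by
  intro fd _ _
  show transformLatLongFieldDefinition fd = transformLatLongFieldDefinition_alt fd
  unfold transformLatLongFieldDefinition transformLatLongFieldDefinition_alt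
  rw [aLoop_eq fd 0 [] []]
  simp only [List.nil_append, bLoop_eq, pvPosI_eq]
  rw [← pvPos_length]
  by_cases h2 : (pvPos fd).length = 2
  · obtain ⟨a, b, hab⟩ := List.length_eq_two.mp h2
    have hlt : a < b := by
      have := pvPos_pairwise fd
      rw [hab] at this
      exact (List.pairwise_cons.mp this).1 b (by simp)
    have hsorted : PySem.List.sorted ((pvPos fd).map (fun k : Nat => (0 : Int) + (k : Int))) (fun x => x) true
        = [(b : Int), (a : Int)] := by
      apply PySem.List.sorted_rev_eq_of_perm_of_pairwise_gt
      · rw [hab]; simp only [List.map_cons, List.map_nil, Int.zero_add]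
        exact List.Perm.swap _ _ _
      · simp only [List.pairwise_cons]
        refine ⟨?_, by simp⟩
        intro x hx; simp at hx; subst hx; exact_mod_cast hlt
    simp only [List.length_map, h2, beq_self_eq_true, if_true]
    rw [hsorted]
    simp only [List.foldl_cons, List.foldl_nil, Int.toNat_natCast]
    rw [erase2 fd a b hab]
  · simp only [List.length_map]
    have : ((pvPos fd).length == 2) = false := by simp [h2]
    simp [this]
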